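-- pv_equiv track=rewrite | github.com/thehalleyyoung/deppy | src/deppy/render/predicate_refine.py | is_suffix_array
-- ===== SOURCE A (Python) =====
-- from typing import (
--     Any,
--     Callable,
--     Dict,
--     FrozenSet,
--     Iterator,
--     List,
--     Optional,
--     Sequence,
--     Set,
--     Tuple,
--     Union,
-- )
--
-- def is_suffix_array(text: str, sa: Sequence[int]) -> bool:
--     """Check that sa is a valid suffix array of text."""
--     n = len(text)
--     if len(sa) != n:
--         return False
--     if sorted(sa) != list(range(n)):
--         return False
--     for i in range(n - 1):
--         if text[sa[i]:] > text[sa[i + 1]:]: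
--             return False
--     return True
-- ===== SOURCE B (Python) =====
-- def is_suffix_array(text, sa):
--     n = len(text)
--     return len(sa) == n and list(sa) == sorted(range(n), key=lambda i: text[i:])
-- ===== Notes on version B (the rewrite author's own statement) =====
-- stated objective: simpler
-- what changed: Instead of A's three separate checks (length, sorted(sa)==range(n), pairwise adjacent suffix comparisons), B recomputes the unique suffix array by sorting the indices by suffix and compares sa to it; all suffixes are distinct, so the two checks coincide.
import Mathlib
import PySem

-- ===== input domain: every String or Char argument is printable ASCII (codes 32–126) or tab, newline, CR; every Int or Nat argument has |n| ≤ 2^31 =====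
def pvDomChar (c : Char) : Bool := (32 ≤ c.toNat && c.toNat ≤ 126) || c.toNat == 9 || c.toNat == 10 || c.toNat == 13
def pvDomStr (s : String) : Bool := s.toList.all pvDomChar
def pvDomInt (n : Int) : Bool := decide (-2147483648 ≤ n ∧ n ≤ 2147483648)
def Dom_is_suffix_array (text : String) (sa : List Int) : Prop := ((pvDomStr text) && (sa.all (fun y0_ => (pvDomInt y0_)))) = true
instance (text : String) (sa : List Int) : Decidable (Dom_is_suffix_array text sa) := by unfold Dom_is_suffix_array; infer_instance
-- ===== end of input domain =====

-- B re-states the check as "sa equals the suffix array recomputed by sorting the indices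
-- by suffix" (the suffix array is unique, since all suffixes are distinct): simpler, not faster.

-- ===== PORT A =====
-- n = len(text); length check; sorted(sa) == list(range(n)); then for each adjacent pair,
-- fail iff text[sa[i]:] > text[sa[i+1]:] (Python str '>' is Lean's '<' flipped).
def is_suffix_array (text : String) (sa : List Int) : Bool :=
  let n : Int := PySem.Str.len text
  if (sa.length : Int) ≠ n then false
  else if PySem.List.sorted sa (fun x => x) ≠ PySem.List.pyRange 0 n then false
  else
    (PySem.List.pyRange 0 (n - 1)).all (fun i =>
      !(decide (PySem.Str.slice text (some (PySem.List.pyGetD sa (i + 1) 0)) none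
                < PySem.Str.slice text (some (PySem.List.pyGetD sa i 0)) none)))

-- ===== PORT B =====
-- return len(sa) == n and list(sa) == sorted(range(n), key=lambda i: text[i:])
def is_suffix_array_alt (text : String) (sa : List Int) : Bool :=
  let n : Int := PySem.Str.len text
  decide ((sa.length : Int) = n) &&
    decide (sa = PySem.List.sorted (PySem.List.pyRange 0 n)
                   (fun i => PySem.Str.slice text (some i) none))

-- ===== PRECONDITION & SPEC =====
def Spec_is_suffix_array (text : String) (sa : List Int) (out : Bool) : Prop := out = is_suffix_array_alt text sa
instance (text : String) (sa : List Int) (out : Bool) : Decidable (Spec_is_suffix_array text sa out) := by unfold Spec_is_suffix_array; infer_instance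

-- ===== CLAIM (what is proved, stated in full; the proofs are below) =====
def Claim_equal_is_suffix_array : Prop := ∀ (text : String) (sa : List Int), Dom_is_suffix_array text sa → Spec_is_suffix_array text sa (is_suffix_array text sa)

-- ===== LEMMAS AND PROOFS =====

-- the suffix key used by B's port
def sfx (text : String) (i : Int) : String := PySem.Str.slice text (some i) none

lemma sfx_toList (text : String) (i : Int) (h : 0 ≤ i) :
    (sfx text i).toList = text.toList.drop i.toNat := by
  have hi : i = ((i.toNat : Nat) : Int) := by omega
  rw [sfx, hi, PySem.Str.toList_slice, PySem.Chars.slice_eq_listSlice,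
    PySem.List.slice_from_natCast, Int.toNat_natCast]

-- distinct valid start indices give distinct suffixes (their lengths differ)
lemma sfx_inj (text : String) (i j : Int)
    (hi0 : 0 ≤ i) (hi : i < text.toList.length) (hj0 : 0 ≤ j) (hj : j < text.toList.length)
    (h : sfx text i = sfx text j) : i = j := by
  have h' := congrArg (fun s => s.toList.length) h
  simp only [sfx_toList text i hi0, sfx_toList text j hj0, List.length_drop] at h'
  omega

-- in-range indexing through pyGetD is plain getElem
lemma pyGetD_getElem (sa : List Int) (m : Nat) (hm : m < sa.length) (x : Int) (hx : x = (m : Int)) :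
    PySem.List.pyGetD sa x 0 = sa[m] := by
  rw [hx, PySem.List.pyGetD_of_nonneg sa 0 (by positivity), Int.toNat_natCast]
  simp [List.getD_eq_getElem?_getD, List.getElem?_eq_getElem hm]

-- A's permutation test: sorted(sa) == list(range(n)) iff sa is a permutation of range(n)
lemma sortedA_eq_iff_perm (sa : List Int) (n : Int) :
    (PySem.List.sorted sa (fun x => x) = PySem.List.pyRange 0 n)
      ↔ sa.Perm (PySem.List.pyRange 0 n) := by
  constructor
  · intro h
    have hp := PySem.List.sorted_perm sa (fun x => x) false
    rw [h] at hp
    exact hp.symm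
  · intro h
    exact PySem.List.sorted_eq_of_perm_of_pairwise_lt _ _ _ h.symm
      (PySem.List.pairwise_lt_pyRange_one 0 n)

-- consecutive ≤ on distinct valid indices upgrades to Pairwise < of the suffix keys
lemma pairwise_lt_of_consec (text : String) (sa : List Int)
    (hnd : sa.Nodup)
    (hmem : ∀ x ∈ sa, 0 ≤ x ∧ x < text.toList.length)
    (hcons : ∀ k, (hk : k + 1 < sa.length) → sfx text sa[k] ≤ sfx text sa[k + 1]) :
    sa.Pairwise (fun a b => sfx text a < sfx text b) := by
  haveI : Trans (fun a b => sfx text a < sfx text b) (fun a b => sfx text a < sfx text b)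
      (fun a b => sfx text a < sfx text b) := ⟨fun hab hbc => lt_trans hab hbc⟩
  apply List.IsChain.pairwise
  rw [List.isChain_iff_getElem]
  intro k hk
  have hle := hcons k hk
  have hne : sa[k] ≠ sa[k + 1] := by
    have := List.Nodup.getElem_inj_iff hnd (i := k) (hi := by omega) (j := k + 1) (hj := hk)
    intro h; omega
  rcases lt_or_eq_of_le hle with h | h
  · exact h
  · exfalso
    have h1 := hmem sa[k] (List.getElem_mem _)
    have h2 := hmem sa[k + 1] (List.getElem_mem _)
    exact hne (sfx_inj text _ _ h1.1 h1.2 h2.1 h2.2 h)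

-- A's adjacent-comparison loop passes iff every consecutive pair of suffixes is ≤
lemma loopA_iff (text : String) (sa : List Int) (hlen : (sa.length : Int) = text.toList.length) :
    ((PySem.List.pyRange 0 ((text.toList.length : Int) - 1)).all (fun i =>
      !(decide (PySem.Str.slice text (some (PySem.List.pyGetD sa (i + 1) 0)) none
                < PySem.Str.slice text (some (PySem.List.pyGetD sa i 0)) none))) = true)
      ↔ ∀ k, (hk : k + 1 < sa.length) → sfx text sa[k] ≤ sfx text sa[k + 1] := by
  rw [List.all_eq_true]
  constructor
  · intro h k hk
    have hkm : (k : Int) ∈ PySem.List.pyRange 0 ((text.toList.length : Int) - 1) := by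
      rw [PySem.List.mem_pyRange_one]; omega
    have hk' := h _ hkm
    simp only [Bool.not_eq_eq_eq_not, Bool.not_true, decide_eq_false_iff_not, not_lt] at hk'
    rw [pyGetD_getElem sa k (by omega) _ rfl,
      pyGetD_getElem sa (k + 1) hk _ (by push_cast; ring)] at hk'
    exact hk'
  · intro h i hi
    rw [PySem.List.mem_pyRange_one] at hi
    have hk : i.toNat + 1 < sa.length := by omega
    have hle := h i.toNat hk
    simp only [Bool.not_eq_eq_eq_not, Bool.not_true, decide_eq_false_iff_not, not_lt]
    rw [pyGetD_getElem sa i.toNat (by omega) _ (by omega),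
      pyGetD_getElem sa (i.toNat + 1) hk _ (by omega)]
    exact hle

-- ===== VERDICT (by name: the statement is the Claim_ definition above) =====
theorem is_suffix_array_spec : Claim_equal_is_suffix_array := by
  intro text sa _
  unfold Spec_is_suffix_array is_suffix_array is_suffix_array_alt
  simp only [PySem.Str.len_eq]
  rw [Bool.eq_iff_iff]
  simp only [Bool.and_eq_true, decide_eq_true_eq]
  by_cases hlen : (sa.length : Int) = (text.toList.length : Int)
  · rw [if_neg (not_not_intro hlen)]
    by_cases hperm : sa.Perm (PySem.List.pyRange 0 (text.toList.length : Int))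
    · rw [if_neg (not_not_intro ((sortedA_eq_iff_perm _ _).mpr hperm))]
      have hnd : sa.Nodup :=
        hperm.nodup_iff.mpr (PySem.List.pairwise_lt_pyRange_one 0 _).nodup
      have hmem : ∀ x ∈ sa, 0 ≤ x ∧ x < (text.toList.length : Int) := by
        intro x hx
        exact PySem.List.mem_pyRange_one.mp (hperm.mem_iff.mp hx)
      rw [loopA_iff text sa hlen]
      constructor
      · intro hloop
        refine ⟨hlen, ?_⟩
        symm
        exact PySem.List.sorted_eq_of_perm_of_pairwise_lt _ _ _ hperm
          (pairwise_lt_of_consec text sa hnd hmem hloop)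
      · rintro ⟨-, hsa⟩
        have hpw : sa.Pairwise (fun a b => sfx text a ≤ sfx text b) := by
          rw [hsa]; exact PySem.List.sorted_pairwise _ _
        rw [List.pairwise_iff_getElem] at hpw
        intro k hk
        exact hpw k (k + 1) (by omega) hk (by omega)
    · rw [if_pos (fun h => hperm ((sortedA_eq_iff_perm _ _).mp h))]
      simp only [Bool.false_eq_true, false_iff, not_and]
      intro _ hsa
      apply hperm
      rw [hsa]
      exact PySem.List.sorted_perm _ _ _
  · rw [if_pos hlen]
    simp only [Bool.false_eq_true, false_iff, not_and]
    exact fun h _ => hlen h
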